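-- pv_equiv track=rewrite | github.com/ajay99511/ENGRAM | packages/shared/text_budget.py | _safe_boundary_slice
-- ===== SOURCE A (Python) =====
-- def _safe_boundary_slice(text: str, max_chars: int) -> str:
--     if len(text) <= max_chars:
--         return text
--     if max_chars <= 0:
--         return ""
--
--     chunk = text[:max_chars]
--     boundary_chars = ["\n", ".", "!", "?", ";", ":", ",", " "]
--     last_boundary = -1
--     for marker in boundary_chars:
--         idx = chunk.rfind(marker)
--         if idx > last_boundary:
--             last_boundary = idx
--
--     if last_boundary > max_chars // 2:
--         return chunk[: last_boundary + 1].rstrip()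
--     return chunk.rstrip()
-- ===== SOURCE B (Python) =====
-- BOUNDARY_CHARS = {"\n", ".", "!", "?", ";", ":", ",", " "}
--
--
-- def _safe_boundary_slice(text: str, max_chars: int) -> str:
--     if len(text) <= max_chars:
--         return text
--     if max_chars <= 0:
--         return ""
--
--     chunk = text[:max_chars]
--     last_boundary = -1
--     for i in range(len(chunk) - 1, -1, -1):
--         if chunk[i] in BOUNDARY_CHARS:
--             last_boundary = i
--             break
--
--     if last_boundary > max_chars // 2:
--         return chunk[: last_boundary + 1].rstrip()
--     return chunk.rstrip()
-- ===== Notes on version B (the rewrite author's own statement) =====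
-- stated objective: idiomatic
-- what changed: A scans the chunk eight times (one rfind per boundary character) and keeps the maximum index; B makes a single right-to-left pass over the chunk, stopping at the first character that lies in a boundary set.
import Mathlib
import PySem

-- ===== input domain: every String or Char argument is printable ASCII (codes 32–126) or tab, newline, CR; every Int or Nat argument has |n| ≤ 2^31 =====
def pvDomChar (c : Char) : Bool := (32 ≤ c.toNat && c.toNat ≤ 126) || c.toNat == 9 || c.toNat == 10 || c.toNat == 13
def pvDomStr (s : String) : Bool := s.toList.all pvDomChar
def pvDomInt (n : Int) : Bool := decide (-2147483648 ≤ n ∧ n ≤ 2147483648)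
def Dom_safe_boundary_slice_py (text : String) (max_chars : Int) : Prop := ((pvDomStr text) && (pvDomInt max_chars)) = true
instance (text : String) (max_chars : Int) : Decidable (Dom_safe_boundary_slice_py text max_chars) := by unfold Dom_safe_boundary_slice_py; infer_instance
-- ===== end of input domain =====

-- B replaces A's eight separate rfind scans of the chunk by a single right-to-left pass
-- that stops at the first boundary character (objective: alternative single-pass traversal).


-- ===== PORT A =====
def safe_boundary_slice_py (text : String) (max_chars : Int) : String :=
  if (text.length : Int) ≤ max_chars then text
  else if max_chars ≤ 0 then ""
  else
    let chunk : List Char := PySem.Chars.slice text.toList none (some max_chars)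
    let boundary_chars : List (List Char) := [['\n'], ['.'], ['!'], ['?'], [';'], [':'], [','], [' ']]
    let last_boundary : Int := boundary_chars.foldl
      (fun last marker =>
        let idx := PySem.Chars.rfind chunk marker
        if idx > last then idx else last) (-1)
    if last_boundary > PySem.Int.floordiv max_chars 2 then
      String.ofList (PySem.Chars.rstrip (PySem.Chars.slice chunk none (some (last_boundary + 1))))
    else
      String.ofList (PySem.Chars.rstrip chunk)

-- ===== PORT B =====
def pvBoundaryChars : PySem.Set Char := PySem.Set.ofList ['\n', '.', '!', '?', ';', ':', ',', ' ']

-- the loop 'for i in range(len(chunk)-1, -1, -1): if chunk[i] in BOUNDARY_CHARS: last_boundary = i; break'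
-- (the index is always in range, so the getD default is never consulted)
def pvLastBoundary (cs : List Char) : Nat → Int
  | 0 => -1
  | j + 1 => if PySem.Set.contains pvBoundaryChars (cs.getD j ' ') then (j : Int) else pvLastBoundary cs j

def safe_boundary_slice_py_alt (text : String) (max_chars : Int) : String :=
  if (text.length : Int) ≤ max_chars then text
  else if max_chars ≤ 0 then ""
  else
    let chunk : List Char := PySem.Chars.slice text.toList none (some max_chars)
    let last_boundary : Int := pvLastBoundary chunk chunk.length
    if last_boundary > PySem.Int.floordiv max_chars 2 then
      String.ofList (PySem.Chars.rstrip (PySem.Chars.slice chunk none (some (last_boundary + 1))))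
    else
      String.ofList (PySem.Chars.rstrip chunk)

-- ===== PRECONDITION & SPEC =====
def Spec_safe_boundary_slice_py (text : String) (max_chars : Int) (out : String) : Prop := out = safe_boundary_slice_py_alt text max_chars
instance (text : String) (max_chars : Int) (out : String) : Decidable (Spec_safe_boundary_slice_py text max_chars out) := by unfold Spec_safe_boundary_slice_py; infer_instance

-- ===== CLAIM (what is proved, stated in full; the proofs are below) =====
def Claim_equal_safe_boundary_slice_py : Prop := ∀ (text : String) (max_chars : Int), Dom_safe_boundary_slice_py text max_chars → Spec_safe_boundary_slice_py text max_chars (safe_boundary_slice_py text max_chars)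

-- ===== LEMMAS AND PROOFS =====

-- rightmost occurrence of the single character m among indices < n, as a downward scan
def chRev (cs : List Char) (m : Char) : Nat → Int
  | 0 => -1
  | j + 1 => if cs[j]? = some m then (j : Int) else chRev cs m j

lemma prefix_single (m : Char) (l : List Char) : [m].isPrefixOf l = (l[0]? == some m) := by
  cases l <;> simp [List.isPrefixOf, eq_comm]

lemma go_eq_chRev (cs : List Char) (m : Char) : ∀ n, PySem.Chars.rfind.go cs [m] n = chRev cs m (n + 1) := by
  intro n
  induction n with
  | zero => simp [PySem.Chars.rfind.go, chRev, prefix_single]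
  | succ j ih =>
      rw [show PySem.Chars.rfind.go cs [m] (j+1)
            = (if [m].isPrefixOf (List.drop (j+1) cs) then ((j:Int)+1) else PySem.Chars.rfind.go cs [m] j) from rfl]
      simp only [prefix_single, List.getElem?_drop, Nat.add_zero, chRev, ih]
      split_ifs with h1 h2 h2 <;> simp_all

lemma rfind_single (cs : List Char) (m : Char) : PySem.Chars.rfind cs [m] = chRev cs m cs.length := by
  have h := go_eq_chRev cs m cs.length
  rw [PySem.Chars.rfind, h, chRev]
  simp

lemma chRev_lt (cs : List Char) (m : Char) : ∀ n, chRev cs m n < (n : Int) := by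
  intro n
  induction n with
  | zero => simp [chRev]
  | succ j ih => rw [chRev]; split_ifs <;> push_cast <;> omega

lemma fmax_le (f : Char → Int) (b : Int) : ∀ (l : List Char) (a : Int), a ≤ b → (∀ m ∈ l, f m ≤ b) →
    l.foldl (fun acc m => max acc (f m)) a ≤ b := by
  intro l
  induction l with
  | nil => intro a ha _; simpa using ha
  | cons x t ih =>
      intro a ha h
      simp only [List.foldl_cons]
      exact ih _ (max_le ha (h x (by simp))) (fun m hm => h m (by simp [hm]))

lemma init_le_fmax (f : Char → Int) : ∀ (l : List Char) (a : Int), a ≤ l.foldl (fun acc m => max acc (f m)) a := by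
  intro l
  induction l with
  | nil => intro a; simp
  | cons x t ih => intro a; simp only [List.foldl_cons]; exact le_trans (le_max_left _ _) (ih (max a (f x)))

lemma le_fmax_mem (f : Char → Int) : ∀ (l : List Char) (a : Int) (m : Char), m ∈ l →
    f m ≤ l.foldl (fun acc m => max acc (f m)) a := by
  intro l
  induction l with
  | nil => intro a m hm; simp at hm
  | cons x t ih =>
      intro a m hm
      simp only [List.foldl_cons]
      rcases List.mem_cons.mp hm with rfl | hm
      · exact le_trans (le_max_right _ _) (init_le_fmax f t (max a (f m)))
      · exact ih _ m hm

lemma main_fold (cs : List Char) : ∀ n, n ≤ cs.length →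
    (['\n', '.', '!', '?', ';', ':', ',', ' '] : List Char).foldl (fun acc m => max acc (chRev cs m n)) (-1)
      = pvLastBoundary cs n := by
  intro n
  induction n with
  | zero => simp [chRev, pvLastBoundary]
  | succ j ih =>
      intro hj
      have hjl : j < cs.length := by omega
      obtain ⟨c, hc⟩ : ∃ c, cs[j]? = some c := ⟨cs[j], List.getElem?_eq_getElem hjl⟩
      have hstep : ∀ (a : Int) (m : Char), m ∈ (['\n', '.', '!', '?', ';', ':', ',', ' '] : List Char) →
          max a (chRev cs m (j+1)) = max a (if c = m then (j : Int) else chRev cs m j) := by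
        intro a m _
        rw [chRev, hc]
        simp
      rw [PySem.List.foldl_congr_mem _ _ (fun acc m => max acc (if c = m then (j : Int) else chRev cs m j)) _ hstep,
          pvLastBoundary, List.getD_eq_getElem?_getD, hc]
      simp only [Option.getD_some]
      by_cases hb : PySem.Set.contains pvBoundaryChars c = true
      · have hcmem : c ∈ (['\n', '.', '!', '?', ';', ':', ',', ' '] : List Char) := by
          have := (PySem.Set.contains_iff pvBoundaryChars c).mp hb
          rw [pvBoundaryChars, PySem.Set.mem_ofList] at this
          exact this
        rw [if_pos hb]
        apply le_antisymm
        · apply fmax_le _ _ _ _ (by omega)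
          intro m _
          split_ifs
          · rfl
          · exact le_of_lt (lt_of_lt_of_le (chRev_lt cs m j) (by omega))
        · have := le_fmax_mem (fun m => if c = m then (j : Int) else chRev cs m j) _ (-1) c hcmem
          simpa using this
      · rw [if_neg hb]
        have hcnot : ∀ m ∈ (['\n', '.', '!', '?', ';', ':', ',', ' '] : List Char), c ≠ m := by
          intro m hm he
          exact hb ((PySem.Set.contains_iff pvBoundaryChars c).mpr (by rw [pvBoundaryChars, PySem.Set.mem_ofList]; exact he ▸ hm))
        rw [PySem.List.foldl_congr_mem _ _ (fun acc m => max acc (chRev cs m j)) _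
              (by intro a m hm; rw [if_neg (hcnot m hm)])]
        exact ih (by omega)

lemma ifgt (a x : Int) : (if x > a then x else a) = max a x := by
  simp only [max_def]; split_ifs <;> omega

lemma foldA_eq (cs : List Char) :
    ([['\n'], ['.'], ['!'], ['?'], [';'], [':'], [','], [' ']] : List (List Char)).foldl
      (fun last marker =>
        let idx := PySem.Chars.rfind cs marker
        if idx > last then idx else last) (-1)
    = pvLastBoundary cs cs.length := by
  rw [← main_fold cs cs.length le_rfl]
  simp only [List.foldl_cons, List.foldl_nil, rfind_single, ifgt]

-- ===== VERDICT (by name: the statement is the Claim_ definition above) =====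
theorem safe_boundary_slice_py_spec : Claim_equal_safe_boundary_slice_py := by
  intro text max_chars _
  unfold Spec_safe_boundary_slice_py safe_boundary_slice_py safe_boundary_slice_py_alt
  split_ifs with h1 h2 <;> try rfl
  simp only [foldA_eq]
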